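-- pv_equiv track=rewrite | github.com/AshleyLab/minigene_pipeline | barcode_codon_rs.py | calculate_variant_depth
-- ===== SOURCE A (Python) =====
-- def calculate_variant_depth(variants, barcodes, depth_dict):
--     """
--     Calculates the total depth for each variant based on its associated barcodes and variant_barcode_depth_dict dictionary
--
--     Parameters:
--     * variants (str): string containing variants separated by ', '
--     * barcodes (str): string containing barcodes separated by ', ' corresponding to the variants it's associated with
--     * depth_dict (dict): variant_barcode_depth_dict where keys are tuples of (variant, barcode) and values are the variant allelic depths seen per {barcode}.bam
--
--     Workflow:
--     1. Split the 'variants' and 'barcodes' strings into a lists ('variants_list' and 'barcodes_list' respectively) using ', ' as delimiter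
--     2. Initialise an empty list 'variant_depths' to store depth values for each variant
--     3. Iterate over each variant in 'variants_list':
--         * initialise a variable 'total_depth' to 0 for the current variant
--         * iterate over each barcode in 'barcodes_list'
--             - use variant_barcode_depth_dict to get the depth value for the specific variant-barcode pair
--             - adds depth value to 'total_depth' if the pair exists in variant_barcode_depth_dict; 0 if pair does not exist
--         * append formatted string "variant: depth" to 'variant_depths' list.
--     4. Join all the elements in 'variant_depths' using ', ' and return resulting string
--     """
--     ### Split the variants and barcodes by ', ' ###
--     variants_list = variants.split(', ')
--     barcodes_list = barcodes.split(', ')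
--
--     variant_depths = []
--
--     ### Iterate over each variant ###
--     for variant in variants_list:
--         total_depth = 0
--         ### Sum the depths for the current variant using the barcodes ###
--         for barcode in barcodes_list:
--             total_depth += depth_dict.get((variant, barcode), 0)
--         ### Append the result as "variant: depth" ###
--         variant_depths.append(f"{variant}: {total_depth}")
--
--     ### Return the joined string of depths ###
--     return ', '.join(variant_depths)
-- ===== SOURCE B (Python) =====
-- def calculate_variant_depth(variants, barcodes, depth_dict):
--     # Count barcode multiplicities once, then sum count-weighted depths
--     # over the DISTINCT barcodes for each variant.
--     counts = {}
--     for b in barcodes.split(', '):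
--         counts[b] = counts.get(b, 0) + 1
--     parts = []
--     for v in variants.split(', '):
--         total = 0
--         for b, c in counts.items():
--             total += c * depth_dict.get((v, b), 0)
--         parts.append(f"{v}: {total}")
--     return ', '.join(parts)
-- ===== Notes on version B (the rewrite author's own statement) =====
-- stated objective: alternative
-- what changed: B builds a barcode-multiplicity dict once and, per variant, sums count * depth over the distinct barcodes instead of re-scanning the full barcode list for every variant.
import Mathlib
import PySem

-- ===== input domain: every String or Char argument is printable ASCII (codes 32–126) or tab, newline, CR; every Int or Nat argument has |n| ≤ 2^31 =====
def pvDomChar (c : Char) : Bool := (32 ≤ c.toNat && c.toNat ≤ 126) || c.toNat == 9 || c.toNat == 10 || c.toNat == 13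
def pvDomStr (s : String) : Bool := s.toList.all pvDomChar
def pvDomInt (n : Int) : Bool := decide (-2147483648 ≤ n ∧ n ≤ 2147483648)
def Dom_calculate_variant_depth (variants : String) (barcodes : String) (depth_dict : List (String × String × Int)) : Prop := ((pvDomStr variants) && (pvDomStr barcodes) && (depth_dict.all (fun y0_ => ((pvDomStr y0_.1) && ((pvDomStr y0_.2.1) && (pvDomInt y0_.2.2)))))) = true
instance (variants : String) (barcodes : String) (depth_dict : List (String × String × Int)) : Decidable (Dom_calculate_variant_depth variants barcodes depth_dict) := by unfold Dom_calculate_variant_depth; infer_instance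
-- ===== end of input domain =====

-- B replaces A's rescan of the full barcode list per variant by one multiplicity
-- dict over barcodes and a count-weighted sum over its distinct entries (alternative).

-- depth_dict.get((v, b), 0): first-match lookup in the association list (exact for a Python dict)
def pvDepthGetD (depth_dict : List (String × String × Int)) (v b : String) : Int :=
  (((depth_dict.find? (fun p => p.1 == v && p.2.1 == b)).map (·.2.2)).getD 0)

-- ===== PORT A =====
def calculate_variant_depth (variants : String) (barcodes : String) (depth_dict : List (String × String × Int)) : String :=
  let variants_list := ((PySem.Str.split? variants ", ").getD [])
  let barcodes_list := ((PySem.Str.split? barcodes ", ").getD [])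
  let variant_depths := variants_list.foldl (fun acc variant =>
    let total_depth := barcodes_list.foldl (fun td barcode => td + pvDepthGetD depth_dict variant barcode) 0
    acc ++ [variant ++ ": " ++ PySem.Int.toStr total_depth]) []
  PySem.Str.join ", " variant_depths

-- ===== PORT B =====
def calculate_variant_depth_alt (variants : String) (barcodes : String) (depth_dict : List (String × String × Int)) : String :=
  let counts := (((PySem.Str.split? barcodes ", ").getD [])).foldl
    (fun d b => d.insert b (d.getD b 0 + 1)) (PySem.Dict.empty : PySem.Dict String Int)
  let parts := (((PySem.Str.split? variants ", ").getD [])).foldl (fun acc v =>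
    let total := counts.items.foldl (fun t p => t + p.2 * pvDepthGetD depth_dict v p.1) 0
    acc ++ [v ++ ": " ++ PySem.Int.toStr total]) []
  PySem.Str.join ", " parts

-- ===== PRECONDITION & SPEC =====
def Spec_calculate_variant_depth (variants : String) (barcodes : String) (depth_dict : List (String × String × Int)) (out : String) : Prop := out = calculate_variant_depth_alt variants barcodes depth_dict
instance (variants : String) (barcodes : String) (depth_dict : List (String × String × Int)) (out : String) : Decidable (Spec_calculate_variant_depth variants barcodes depth_dict out) := by unfold Spec_calculate_variant_depth; infer_instance

-- ===== CLAIM (what is proved, stated in full; the proofs are below) =====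
def Claim_equal_calculate_variant_depth : Prop := ∀ (variants : String) (barcodes : String) (depth_dict : List (String × String × Int)), Dom_calculate_variant_depth variants barcodes depth_dict → Spec_calculate_variant_depth variants barcodes depth_dict (calculate_variant_depth variants barcodes depth_dict)

-- ===== LEMMAS AND PROOFS =====

theorem pv_sum_map_add {α : Type} (l : List α) (f g : α → Int) :
    (l.map (fun x => f x + g x)).sum = (l.map f).sum + (l.map g).sum := by
  induction l with
  | nil => simp
  | cons x t ih => simp [ih]; ring

theorem pv_sum_indicator {α : Type} [BEq α] [LawfulBEq α] (l : List α) (hl : l.Nodup)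
    (x : α) (g : α → Int) :
    (l.map (fun k => if k == x then g k else 0)).sum = if x ∈ l then g x else 0 := by
  induction l with
  | nil => simp
  | cons y t ih =>
    rcases List.nodup_cons.mp hl with ⟨hy, ht⟩
    by_cases h : y = x
    · subst h
      have : (t.map (fun k => if k == y then g k else 0)).sum = 0 := by
        rw [ih ht]; simp [hy]
      simp [this]
    · have hb : (y == x) = false := by simp [h]
      simp only [List.map_cons, List.sum_cons, hb, ih ht, List.mem_cons]
      have hxy : ¬ x = y := fun hh => h hh.symm
      simp [hxy]
  
theorem pv_sum_count {α : Type} [BEq α] [LawfulBEq α] (xs l : List α) (hl : l.Nodup)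
    (g : α → Int) :
    (l.map (fun k => (xs.count k : Int) * g k)).sum
      = ((xs.filter (fun x => decide (x ∈ l))).map g).sum := by
  induction xs with
  | nil => simp
  | cons x t ih =>
    have hc : ∀ k : α, ((x :: t).count k : Int) * g k
        = (t.count k : Int) * g k + (if k == x then g k else 0) := by
      intro k
      have hif : (x == k) = (k == x) := by
        by_cases hxk : x = k
        · simp [hxk]
        · have hkx : ¬ k = x := fun hh => hxk hh.symm
          simp [hxk, hkx]
      have : (x :: t).count k = t.count k + if k == x then 1 else 0 := by
        rw [List.count_cons, hif]
      rw [this]; push_cast; split_ifs <;> ring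
    calc (l.map (fun k => ((x :: t).count k : Int) * g k)).sum
        = (l.map (fun k => (t.count k : Int) * g k + (if k == x then g k else 0))).sum := by
          exact congrArg List.sum (List.map_congr_left (fun k _ => hc k))
      _ = (l.map (fun k => (t.count k : Int) * g k)).sum
            + (l.map (fun k => if k == x then g k else 0)).sum := pv_sum_map_add _ _ _
      _ = ((t.filter (fun y => decide (y ∈ l))).map g).sum + (if x ∈ l then g x else 0) := by
          rw [ih, pv_sum_indicator l hl x g]
      _ = (((x :: t).filter (fun y => decide (y ∈ l))).map g).sum := by
          by_cases h : x ∈ l <;> simp [h]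
          ring

-- per-variant totals agree: A's rescan sum = B's count-weighted sum over distinct barcodes
theorem pv_total_eq (bl : List String) (g : String → Int) :
    bl.foldl (fun td b => td + g b) 0
      = ((bl.foldl (fun d b => d.insert b (d.getD b 0 + 1))
            (PySem.Dict.empty : PySem.Dict String Int)).items).foldl
          (fun t p => t + p.2 * g p.1) 0 := by
  rw [PySem.Dict.foldl_insert_getD_add_one_eq_counter, PySem.Dict.items_counter]
  rw [PySem.List.foldl_add, PySem.List.foldl_add]
  rw [List.map_map]
  have hset : PySem.Set.ofList bl = PySem.List.dedup bl := (PySem.List.dedup_eq_ofList bl).symm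
  rw [hset]
  have hmap : ((fun p : String × Int => p.2 * g p.1) ∘ fun k => (k, (bl.count k : Int)))
      = fun k => (bl.count k : Int) * g k := by funext k; simp
  rw [hmap]
  have hsum := pv_sum_count bl (PySem.List.dedup bl) (PySem.List.nodup_dedup bl) g
  have hfilt : bl.filter (fun x => decide (x ∈ PySem.List.dedup bl)) = bl := by
    apply List.filter_eq_self.mpr
    intro a ha
    simp [ha]
  rw [hfilt] at hsum
  rw [hsum]

-- ===== VERDICT (by name: the statement is the Claim_ definition above) =====
theorem calculate_variant_depth_spec : Claim_equal_calculate_variant_depth := by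
  intro variants barcodes depth_dict _
  show calculate_variant_depth variants barcodes depth_dict
      = calculate_variant_depth_alt variants barcodes depth_dict
  unfold calculate_variant_depth calculate_variant_depth_alt
  simp only [PySem.List.foldl_append_singleton_eq_map]
  congr 1
  apply List.map_congr_left
  intro v _
  rw [pv_total_eq (((PySem.Str.split? barcodes ", ").getD [])) (pvDepthGetD depth_dict v)]
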